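-- pv_equiv track=rewrite | github.com/ucfcbb/RNAMotifContrast | src/scripts/pymol_helper.py | fix_alignment
-- ===== SOURCE A (Python) =====
-- def fix_alignment(fasta_seq, aln1, aln2):
--     new_aln1 = list(aln1)
--     new_aln2 = list(aln2)
--
--     last_hyphen_ind = -1
--     for i in range(len(aln1)):
--
--         if aln2[i] == '-':
--             last_hyphen_ind = i
--
--         if fasta_seq[i] != aln1[i]:
--             j = last_hyphen_ind
--             new_aln1.pop(j)
--             new_aln2.pop(j)
--             break
--
--     return ''.join(new_aln1), ''.join(new_aln2)
-- ===== SOURCE B (Python) =====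
-- def fix_alignment(fasta_seq, aln1, aln2):
--     # forward search for the first mismatch; nothing to fix if there is none
--     k = next((i for i in range(len(aln1)) if fasta_seq[i] != aln1[i]), None)
--     if k is None:
--         return aln1, aln2
--     # backward search for the nearest hyphen in aln2 at or before the mismatch
--     j = next((t for t in range(k, -1, -1) if aln2[t] == '-'), -1)
--     if j < 0:
--         return aln1[:-1], aln2[:-1]
--     return aln1[:j] + aln1[j + 1:], aln2[:j] + aln2[j + 1:]
-- ===== Notes on version B (the rewrite author's own statement) =====
-- stated objective: alternative
-- what changed: A's single stateful loop (running last_hyphen_ind tracker plus in-place list pops and join) is replaced by a forward search for the first mismatch, a separate backward search for the nearest preceding hyphen in aln2, and slice-concatenation deletion on the strings.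
import Mathlib
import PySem

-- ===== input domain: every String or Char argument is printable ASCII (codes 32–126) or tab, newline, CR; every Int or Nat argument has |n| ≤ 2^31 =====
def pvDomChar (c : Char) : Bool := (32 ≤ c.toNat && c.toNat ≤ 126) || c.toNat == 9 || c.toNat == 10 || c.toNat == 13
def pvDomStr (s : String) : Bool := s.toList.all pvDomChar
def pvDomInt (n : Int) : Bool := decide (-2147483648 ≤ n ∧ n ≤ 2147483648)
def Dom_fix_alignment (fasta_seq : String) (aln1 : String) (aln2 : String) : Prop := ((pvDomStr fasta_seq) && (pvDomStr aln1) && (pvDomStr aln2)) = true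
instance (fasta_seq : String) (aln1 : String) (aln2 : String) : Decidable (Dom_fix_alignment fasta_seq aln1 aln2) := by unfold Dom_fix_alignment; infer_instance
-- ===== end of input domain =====

-- B replaces A's single stateful loop (running last-hyphen tracker + list pops) by a plain
-- forward search for the first mismatch, a backward search for the preceding hyphen, and
-- slice deletion; objective: alternative decomposition (no speed claim).

-- ===== PORT A =====
-- A's for-loop: i runs over range(len(aln1)); lhi is last_hyphen_ind; n1/n2 are
-- new_aln1/new_aln2 (copies of the inputs, untouched until the pop at the break).
-- Where Python raises (an index out of range) a pyGet? is none; the port then takes the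
-- arbitrary fall-through (those inputs are excluded by Pre_fix_alignment).
def fixAux (fs a1 a2 : List Char) (i : Nat) (lhi : Int) (n1 n2 : List Char) : List Char × List Char :=
  if _h : i < a1.length then
    let lhi' : Int := if PySem.List.pyGet? a2 (i : Int) = some '-' then (i : Int) else lhi
    if PySem.List.pyGet? fs (i : Int) ≠ PySem.List.pyGet? a1 (i : Int) then
      match PySem.List.pop? n1 lhi', PySem.List.pop? n2 lhi' with
      | some (_, r1), some (_, r2) => (r1, r2)
      | _, _ => (n1, n2)  -- Python raises IndexError here; outside Pre_
    else
      fixAux fs a1 a2 (i + 1) lhi' n1 n2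
  else (n1, n2)
termination_by a1.length - i

def fix_alignment (fasta_seq : String) (aln1 : String) (aln2 : String) : String × String :=
  let r := fixAux fasta_seq.toList aln1.toList aln2.toList 0 (-1) aln1.toList aln2.toList
  (String.ofList r.1, String.ofList r.2)

-- ===== PORT B =====
-- next((i for i in range(len(aln1)) if fasta_seq[i] != aln1[i]), None)
def findMismatch (fs a1 : List Char) (i : Nat) : Option Nat :=
  if _h : i < a1.length then
    if PySem.List.pyGet? fs (i : Int) ≠ PySem.List.pyGet? a1 (i : Int) then some i
    else findMismatch fs a1 (i + 1)
  else none
termination_by a1.length - i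

-- next((t for t in range(k, -1, -1) if aln2[t] == '-'), -1)
def rscanHyphen (a2 : List Char) (t : Nat) : Int :=
  if PySem.List.pyGet? a2 (t : Int) = some '-' then (t : Int)
  else match t with
    | 0 => -1
    | Nat.succ u => rscanHyphen a2 u

def fix_alignment_alt (fasta_seq : String) (aln1 : String) (aln2 : String) : String × String :=
  match findMismatch fasta_seq.toList aln1.toList 0 with
  | none => (aln1, aln2)
  | some k =>
    let j := rscanHyphen aln2.toList k
    if j < 0 then
      (String.ofList (PySem.List.slice aln1.toList none (some (-1))),
       String.ofList (PySem.List.slice aln2.toList none (some (-1))))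
    else
      (String.ofList (PySem.List.slice aln1.toList none (some j) ++ PySem.List.slice aln1.toList (some (j + 1)) none),
       String.ofList (PySem.List.slice aln2.toList none (some j) ++ PySem.List.slice aln2.toList (some (j + 1)) none))

-- ===== PRECONDITION & SPEC =====
-- Exactly the inputs where A returns: every index the loop actually reaches (all earlier
-- positions of fasta_seq and aln1 agree) must be in range of both fasta_seq and aln2.
def Pre_fix_alignment (fasta_seq : String) (aln1 : String) (aln2 : String) : Prop :=
  ∀ i : Nat, i < aln1.toList.length →
    (∀ m : Nat, m < i → fasta_seq.toList[m]? = aln1.toList[m]?) →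
    i < fasta_seq.toList.length ∧ i < aln2.toList.length
instance (fasta_seq : String) (aln1 : String) (aln2 : String) : Decidable (Pre_fix_alignment fasta_seq aln1 aln2) := by unfold Pre_fix_alignment; infer_instance

def pvWitness_fix_alignment : String × String × String := ("ACT", "A-T", "AG-")

def Spec_fix_alignment (fasta_seq : String) (aln1 : String) (aln2 : String) (out : String × String) : Prop := out = fix_alignment_alt fasta_seq aln1 aln2
instance (fasta_seq : String) (aln1 : String) (aln2 : String) (out : String × String) : Decidable (Spec_fix_alignment fasta_seq aln1 aln2 out) := by unfold Spec_fix_alignment; infer_instance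

-- ===== CLAIM (what is proved, stated in full; the proofs are below) =====
def Claim_equal_fix_alignment : Prop := ∀ (fasta_seq : String) (aln1 : String) (aln2 : String), Dom_fix_alignment fasta_seq aln1 aln2 → Pre_fix_alignment fasta_seq aln1 aln2 → Spec_fix_alignment fasta_seq aln1 aln2 (fix_alignment fasta_seq aln1 aln2)

-- ===== LEMMAS AND PROOFS =====

-- last hyphen index of a2 strictly below i (A's last_hyphen_ind when the loop is at i)
def lhiOf (a2 : List Char) : Nat → Int
  | 0 => -1
  | Nat.succ u => if a2[u]? = some '-' then (u : Int) else lhiOf a2 u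

lemma rscanHyphen_eq_lhiOf (a2 : List Char) (k : Nat) :
    rscanHyphen a2 k = lhiOf a2 (k + 1) := by
  induction k with
  | zero => simp [rscanHyphen, lhiOf, PySem.List.pyGet?_zero]
  | succ u ih =>
      rw [rscanHyphen, lhiOf]
      simp only [PySem.List.pyGet?_natCast]
      split_ifs with h
      · rfl
      · exact ih

lemma lhiOf_cases (a2 : List Char) (n : Nat) :
    lhiOf a2 n = -1 ∨ ∃ t : Nat, lhiOf a2 n = (t : Int) ∧ t < n ∧ a2[t]? = some '-' := by
  induction n with
  | zero => left; rfl
  | succ u ih =>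
      rw [lhiOf]
      split_ifs with h
      · right; exact ⟨u, rfl, Nat.lt_succ_self u, h⟩
      · rcases ih with h1 | ⟨t, h1, h2, h3⟩
        · left; exact h1
        · right; exact ⟨t, h1, Nat.lt_succ_of_lt h2, h3⟩

lemma fixAux_eq (fs a1 a2 : List Char)
    (hpre : ∀ i : Nat, i < a1.length → (∀ m : Nat, m < i → fs[m]? = a1[m]?) →
      i < fs.length ∧ i < a2.length) :
    ∀ d i, a1.length - i ≤ d →
    (∀ m : Nat, m < i → fs[m]? = a1[m]?) →
    fixAux fs a1 a2 i (lhiOf a2 i) a1 a2 =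
      (match findMismatch fs a1 i with
       | none => (a1, a2)
       | some k =>
         let j := rscanHyphen a2 k
         if j < 0 then (a1.dropLast, a2.dropLast)
         else (a1.take j.toNat ++ a1.drop (j.toNat + 1),
               a2.take j.toNat ++ a2.drop (j.toNat + 1))) := by
  intro d
  induction d with
  | zero =>
      intro i hd hm
      have hge : a1.length ≤ i := by omega
      rw [fixAux, findMismatch]
      simp [Nat.not_lt_of_le hge]
  | succ d ih =>
      intro i hd hm
      by_cases hi : i < a1.length
      · obtain ⟨hfs, ha2⟩ := hpre i hi hm
        rw [fixAux, findMismatch]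
        simp only [hi, dif_pos, PySem.List.pyGet?_natCast]
        have hlhi' : (if a2[(i:Nat)]? = some '-' then (i : Int) else lhiOf a2 i) = lhiOf a2 (i + 1) := by
          rw [lhiOf]
        rw [hlhi']
        by_cases hmis : fs[i]? ≠ a1[i]?
        · simp only [hmis, if_pos, ne_eq, not_false_eq_true]
          rw [rscanHyphen_eq_lhiOf]
          rcases lhiOf_cases a2 (i + 1) with hc | ⟨t, hc, ht, hhy⟩
          · -- pop(-1): both lists are nonempty
            have h1 : a1 ≠ [] := List.ne_nil_of_length_pos (by omega)
            have h2 : a2 ≠ [] := List.ne_nil_of_length_pos (by omega)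
            rw [hc]
            rw [show a1 = a1.dropLast ++ [a1.getLast h1] from (List.dropLast_concat_getLast h1).symm,
                show a2 = a2.dropLast ++ [a2.getLast h2] from (List.dropLast_concat_getLast h2).symm]
            rw [PySem.List.pop?_last, PySem.List.pop?_last]
            simp
          · have ht2 : t < a2.length := by
              by_contra hc2
              rw [List.getElem?_eq_none (by omega)] at hhy
              simp at hhy
            have ht1 : t < a1.length := by omega
            rw [hc, PySem.List.pop?_natCast a1 t ht1, PySem.List.pop?_natCast a2 t ht2]
            have : ¬ ((t : Int) < 0) := by omega
            simp [this, Int.toNat_natCast, List.eraseIdx_eq_take_drop_succ]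
        · simp only [ne_eq, not_not] at hmis
          simp only [hmis, ne_eq, not_true_eq_false, if_neg, not_false_eq_true]
          have hm' : ∀ m : Nat, m < i + 1 → fs[m]? = a1[m]? := by
            intro m hmlt
            rcases Nat.lt_succ_iff_lt_or_eq.mp hmlt with h | h
            · exact hm m h
            · subst h; exact hmis
          exact ih (i + 1) (by omega) hm'
      · rw [fixAux, findMismatch]
        simp [hi]

-- ===== VERDICT (by name: the statement is the Claim_ definition above) =====
theorem fix_alignment_spec : Claim_equal_fix_alignment := by
  intro fasta_seq aln1 aln2 _ hpre
  unfold Spec_fix_alignment fix_alignment fix_alignment_alt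
  have h := fixAux_eq fasta_seq.toList aln1.toList aln2.toList hpre aln1.toList.length 0
    (by omega) (by intro m hm; omega)
  rw [show lhiOf aln2.toList 0 = (-1 : Int) from rfl] at h
  rw [h]
  cases hk : findMismatch fasta_seq.toList aln1.toList 0 with
  | none => simp
  | some k =>
      simp only []
      by_cases hj : rscanHyphen aln2.toList k < 0
      · simp only [hj, if_pos]
        rw [PySem.List.slice_to_neg_one, PySem.List.slice_to_neg_one]
      · simp only [hj, if_neg, not_false_eq_true]
        have h0 : (0 : Int) ≤ rscanHyphen aln2.toList k := by omega
        rw [PySem.List.slice_to _ h0, PySem.List.slice_to _ h0,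
            PySem.List.slice_from _ (by omega), PySem.List.slice_from _ (by omega)]
        have : (rscanHyphen aln2.toList k + 1).toNat = (rscanHyphen aln2.toList k).toNat + 1 := by omega
        rw [this]
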